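-- pv_equiv track=rewrite | github.com/khushi-mangal/sign-language-ui | web_demo/ml/ml_train.py | generate_combos
-- ===== SOURCE A (Python) =====
-- def generate_combos(base_labels, max_len=3):
--     combos = []
--
--     def helper(prefix):
--         if 0 < len(prefix) <= max_len:
--             combos.append("".join(prefix))
--         if len(prefix) == max_len:
--             return
--         for l in base_labels:
--             if prefix and prefix[-1] == l:
--                 continue
--             helper(prefix + [l])
--
--     helper([])
--     return combos
-- ===== SOURCE B (Python) =====
-- def generate_combos(base_labels, max_len=3):
--     # Explicit-stack pre-order DFS instead of recursion; children are pushed in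
--     # reverse label order so popping reproduces the recursive left-to-right order.
--     results = []
--     stack = [[]]
--     while stack:
--         prefix = stack.pop()
--         n = len(prefix)
--         if 0 < n <= max_len:
--             results.append("".join(prefix))
--         if n < max_len:
--             last = prefix[-1] if prefix else None
--             for l in reversed(base_labels):
--                 if l != last:
--                     stack.append(prefix + [l])
--     return results
-- ===== Notes on version B (the rewrite author's own statement) =====
-- stated objective: alternative
-- what changed: Replaces the nested recursive helper with a mutating accumulator by an explicit-stack pre-order DFS loop (children pushed in reverse order so pop order matches the recursive emission order).
-- crash fix: When max_len < 0 and base_labels contains two distinct labels A recurses forever and raises RecursionError; B returns []. — e.g. on generate_combos(["a", "b"], -1): A raises RecursionError, B returns []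
import Mathlib
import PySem

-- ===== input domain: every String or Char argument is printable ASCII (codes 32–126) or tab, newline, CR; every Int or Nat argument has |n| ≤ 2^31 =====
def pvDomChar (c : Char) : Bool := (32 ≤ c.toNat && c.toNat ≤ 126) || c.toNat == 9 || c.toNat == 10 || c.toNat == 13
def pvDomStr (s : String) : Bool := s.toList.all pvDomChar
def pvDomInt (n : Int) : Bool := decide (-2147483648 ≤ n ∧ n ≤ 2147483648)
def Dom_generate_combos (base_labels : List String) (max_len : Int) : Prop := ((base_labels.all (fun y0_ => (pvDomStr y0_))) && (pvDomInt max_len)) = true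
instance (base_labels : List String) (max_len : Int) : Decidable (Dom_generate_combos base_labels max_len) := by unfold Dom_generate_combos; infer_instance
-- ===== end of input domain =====

-- B replaces A's recursive helper by an explicit-stack pre-order DFS loop (alternative
-- decomposition, same emission order); equivalence of return values is proved on Pre_.

-- ===== PORT A =====
-- A's nested recursive helper; `fuel` is only a termination guard: the top-level call
-- supplies max_len.toNat, which is exact for the depth whenever 0 ≤ max_len (Pre_'s
-- main case), so the `0 => combos` guard branch is never reached there.
def gcHelper (bl : List String) (m : Int) (p : List String) (combos : List String) (fuel : Nat) : List String :=
  let combos := if 0 < p.length ∧ (p.length : Int) ≤ m then combos ++ [String.join p] else combos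
  if (p.length : Int) = m then combos
  else match fuel with
    | 0 => combos
    | f + 1 => bl.foldl (fun acc l => if p ≠ [] ∧ p.getLast? = some l then acc else gcHelper bl m (p ++ [l]) acc f) combos

def generate_combos (base_labels : List String) (max_len : Int) : List String :=
  gcHelper base_labels max_len [] [] max_len.toNat

-- ===== PORT B =====
-- Source B's while-loop over an explicit stack (head = top).  Pushing the filtered labels in
-- reverse order one by one and later popping them is, on a head-is-top list, exactly
-- prepending the filtered children in label order.  `fuel` is only a termination guard:
-- the top-level call supplies a bound on the number of loop iterations (proved below),
-- so the `0, _ => results` guard branch is never reached.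
def altLoop (bl : List String) (m : Int) (fuel : Nat) (stack : List (List String)) (results : List String) : List String :=
  match fuel, stack with
  | _, [] => results
  | 0, _ => results
  | f + 1, p :: rest =>
      let results := if 0 < p.length ∧ (p.length : Int) ≤ m then results ++ [String.join p] else results
      let stack := if (p.length : Int) < m then ((bl.filter (fun l => p.getLast? ≠ some l)).map (fun l => p ++ [l])) ++ rest else rest
      altLoop bl m f stack results

def generate_combos_alt (base_labels : List String) (max_len : Int) : List String :=
  altLoop base_labels max_len ((base_labels.length + 1) ^ (max_len.toNat + 1)) [[]] []

-- ===== PRECONDITION & SPEC =====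
-- Pre_ excludes exactly the inputs on which the Python A recurses without bound and
-- raises RecursionError: max_len < 0 with at least two distinct labels (with all labels
-- equal the repeat-guard cuts the recursion and A returns []).
def Pre_generate_combos (base_labels : List String) (max_len : Int) : Prop :=
  0 ≤ max_len ∨ ∀ x ∈ base_labels, ∀ y ∈ base_labels, x = y
instance (base_labels : List String) (max_len : Int) : Decidable (Pre_generate_combos base_labels max_len) := by unfold Pre_generate_combos; infer_instance

def pvWitness_generate_combos : List String × Int := (["a", "b"], 2)

-- When max_len < 0 and base_labels contains two distinct labels, A raises RecursionError; B returns [].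
def Raises_generate_combos (base_labels : List String) (max_len : Int) : Prop :=
  max_len < 0 ∧ ∃ x ∈ base_labels, ∃ y ∈ base_labels, x ≠ y
instance (base_labels : List String) (max_len : Int) : Decidable (Raises_generate_combos base_labels max_len) := by unfold Raises_generate_combos; infer_instance
def pvRaiseWitness_generate_combos : List String × Int := (["a", "b"], -1)
def pvRaiseWitnessOut_generate_combos : List String := []

def Spec_generate_combos (base_labels : List String) (max_len : Int) (out : List String) : Prop := out = generate_combos_alt base_labels max_len
instance (base_labels : List String) (max_len : Int) (out : List String) : Decidable (Spec_generate_combos base_labels max_len out) := by unfold Spec_generate_combos; infer_instance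

-- ===== CLAIM (what is proved, stated in full; the proofs are below) =====
def Claim_equal_generate_combos : Prop := ∀ (base_labels : List String) (max_len : Int), Dom_generate_combos base_labels max_len → Pre_generate_combos base_labels max_len → Spec_generate_combos base_labels max_len (generate_combos base_labels max_len)
def Claim_raises_generate_combos : Prop := (∀ (base_labels : List String) (max_len : Int), Dom_generate_combos base_labels max_len → Raises_generate_combos base_labels max_len → ¬ Pre_generate_combos base_labels max_len) ∧ (Dom_generate_combos (pvRaiseWitness_generate_combos.1) (pvRaiseWitness_generate_combos.2) ∧ Raises_generate_combos (pvRaiseWitness_generate_combos.1) (pvRaiseWitness_generate_combos.2) ∧ generate_combos_alt (pvRaiseWitness_generate_combos.1) (pvRaiseWitness_generate_combos.2) = pvRaiseWitnessOut_generate_combos)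

-- ===== LEMMAS AND PROOFS =====

-- The labels that extend prefix p without repeating its last element.
def childLabels (bl : List String) (p : List String) : List String :=
  bl.filter (fun l => p.getLast? ≠ some l)

-- The emission of the DFS subtree rooted at p, with d = remaining depth.
def emitSpec (bl : List String) (d : Nat) (p : List String) : List String :=
  (if 0 < p.length then [String.join p] else []) ++
    match d with
    | 0 => []
    | d + 1 => (childLabels bl p).flatMap (fun l => emitSpec bl d (p ++ [l]))

-- The number of DFS nodes (loop iterations of B) in the subtree rooted at p.
def countSpec (bl : List String) (d : Nat) (p : List String) : Nat :=
  1 + match d with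
      | 0 => 0
      | d + 1 => ((childLabels bl p).map (fun l => countSpec bl d (p ++ [l]))).sum

theorem countSpec_zero (bl : List String) (p : List String) : countSpec bl 0 p = 1 := rfl

theorem countSpec_succ (bl : List String) (d : Nat) (p : List String) :
    countSpec bl (d + 1) p = 1 + ((childLabels bl p).map (fun l => countSpec bl d (p ++ [l]))).sum := rfl

theorem emitSpec_zero (bl : List String) (p : List String) :
    emitSpec bl 0 p = (if 0 < p.length then [String.join p] else []) := by
  unfold emitSpec; simp

theorem emitSpec_succ (bl : List String) (d : Nat) (p : List String) :
    emitSpec bl (d + 1) p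
      = (if 0 < p.length then [String.join p] else [])
          ++ (childLabels bl p).flatMap (fun l => emitSpec bl d (p ++ [l])) := rfl

theorem countSpec_pos (bl : List String) (d : Nat) (p : List String) : 1 ≤ countSpec bl d p := by
  cases d with
  | zero => rw [countSpec_zero]
  | succ d => rw [countSpec_succ]; omega

theorem countSpec_le (bl : List String) (d : Nat) (p : List String) :
    countSpec bl d p ≤ (bl.length + 1) ^ (d + 1) := by
  induction d generalizing p with
  | zero => rw [countSpec_zero]; exact Nat.one_le_pow _ _ (by omega)
  | succ d ih =>
      rw [countSpec_succ]
      have hlen : (childLabels bl p).length ≤ bl.length := List.length_filter_le _ _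
      have hsum : ((childLabels bl p).map (fun l => countSpec bl d (p ++ [l]))).sum
          ≤ (childLabels bl p).length * (bl.length + 1) ^ (d + 1) := by
        have h := List.sum_le_card_nsmul ((childLabels bl p).map (fun l => countSpec bl d (p ++ [l])))
          ((bl.length + 1) ^ (d + 1)) (by
            intro x hx
            rcases List.mem_map.mp hx with ⟨l, _, rfl⟩
            exact ih (p ++ [l]))
        simpa [smul_eq_mul] using h
      have hB : 1 ≤ (bl.length + 1) ^ (d + 1) := Nat.one_le_pow _ _ (by omega)
      calc 1 + ((childLabels bl p).map (fun l => countSpec bl d (p ++ [l]))).sum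
          ≤ 1 + bl.length * (bl.length + 1) ^ (d + 1) := by
            have := Nat.mul_le_mul_right ((bl.length + 1) ^ (d + 1)) hlen
            omega
        _ ≤ (bl.length + 1) * (bl.length + 1) ^ (d + 1) := by
            rw [add_mul, one_mul]; omega
        _ = (bl.length + 1) ^ (d + 1 + 1) := by ring

-- A's helper equals the subtree emission appended to its accumulator.
theorem gcHelper_emit (bl : List String) (m : Int) :
    ∀ (f : Nat) (p acc : List String), (p.length : Int) ≤ m → (f : Int) = m - p.length →
      gcHelper bl m p acc f = acc ++ emitSpec bl f p := by
  intro f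
  induction f with
  | zero =>
      intro p acc hle hf
      have hm : (p.length : Int) = m := by omega
      unfold gcHelper
      rw [emitSpec_zero]
      simp only [hm, le_refl, and_true, if_pos]
      by_cases h : 0 < p.length <;> simp [h]
  | succ f ih =>
      intro p acc hle hf
      have hne : ¬ (p.length : Int) = m := by omega
      unfold gcHelper
      simp only [hne, if_false, hle, and_true]
      rw [show (if 0 < p.length then acc ++ [String.join p] else acc)
            = acc ++ (if 0 < p.length then [String.join p] else []) from by
          by_cases h : 0 < p.length <;> simp [h]]
      rw [emitSpec_succ, ← List.append_assoc]
      -- fold over the labels = flatMap of subtree emissions over the filtered labels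
      have key : ∀ (L : List String) (acc0 : List String),
          L.foldl (fun acc l => if p ≠ [] ∧ p.getLast? = some l then acc
                                else gcHelper bl m (p ++ [l]) acc f) acc0
            = acc0 ++ (L.filter (fun l => p.getLast? ≠ some l)).flatMap
                (fun l => emitSpec bl f (p ++ [l])) := by
        intro L
        induction L with
        | nil => intro acc0; simp
        | cons a t iht =>
            intro acc0
            by_cases hskip : p.getLast? = some a
            · have hpne : p ≠ [] := by
                intro h; rw [h] at hskip; simp [List.getLast?] at hskip
              have h2 : (decide (p.getLast? ≠ some a)) = false := by simp [hskip]
              rw [List.foldl_cons, if_pos ⟨hpne, hskip⟩, List.filter_cons, h2]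
              simpa using iht acc0
            · have hcond : ¬ (p ≠ [] ∧ p.getLast? = some a) := by
                intro h; exact hskip h.2
              simp only [List.foldl_cons, List.filter_cons]
              have hrec : gcHelper bl m (p ++ [a]) acc0 f
                  = acc0 ++ emitSpec bl f (p ++ [a]) := by
                apply ih
                · simp; omega
                · simp; omega
              simp [hskip, iht, hrec]
      rw [key]
      simp [childLabels]

-- B's stack loop with sufficient fuel flat-maps the subtree emissions over the stack.
theorem altLoop_emit (bl : List String) (m : Int) :
    ∀ (fuel : Nat) (stack : List (List String)) (res : List String),
      (∀ p ∈ stack, (p.length : Int) ≤ m) →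
      (stack.map (fun p => countSpec bl (m - p.length).toNat p)).sum ≤ fuel →
      altLoop bl m fuel stack res
        = res ++ stack.flatMap (fun p => emitSpec bl (m - p.length).toNat p) := by
  intro fuel
  induction fuel with
  | zero =>
      intro stack res hinv hfuel
      cases stack with
      | nil => simp [altLoop]
      | cons p rest =>
          exfalso
          have := countSpec_pos bl (m - p.length).toNat p
          simp only [List.map_cons, List.sum_cons] at hfuel
          omega
  | succ f ih =>
      intro stack res hinv hfuel
      cases stack with
      | nil => simp [altLoop]
      | cons p rest =>
          have hple : (p.length : Int) ≤ m := hinv p (by simp)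
          have hrest : ∀ q ∈ rest, (q.length : Int) ≤ m := fun q hq => hinv q (by simp [hq])
          unfold altLoop
          rw [show (if 0 < p.length ∧ (p.length : Int) ≤ m then res ++ [String.join p] else res)
                = res ++ (if 0 < p.length then [String.join p] else []) by
              by_cases h : 0 < p.length <;> simp [h, hple]]
          by_cases hlt : (p.length : Int) < m
          · -- interior node: prepend children
            have hd : (m - p.length).toNat = (m - (p.length + 1)).toNat + 1 := by omega
            have hchild : ∀ l, ((p ++ [l]).length : Int) = (p.length : Int) + 1 := by
              intro l; simp
            set children : List (List String) :=
              (bl.filter (fun l => p.getLast? ≠ some l)).map (fun l => p ++ [l]) with hchdef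
            have hcast : ∀ (l : String), (m - ((p ++ [l]).length : Int)).toNat = (m - ((p.length : Int) + 1)).toNat := by
              intro l; rw [hchild l]
            have hcmap : children.map (fun q => countSpec bl (m - q.length).toNat q)
                = (childLabels bl p).map (fun l => countSpec bl (m - (p.length + 1)).toNat (p ++ [l])) := by
              rw [hchdef, List.map_map]
              unfold childLabels
              apply List.map_congr_left
              intro l hl
              exact congrArg (fun d => countSpec bl d (p ++ [l])) (hcast l)
            have hfuel' : ((children ++ rest).map (fun q => countSpec bl (m - q.length).toNat q)).sum ≤ f := by
              rw [List.map_append, List.sum_append, hcmap]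
              simp only [List.map_cons, List.sum_cons, hd, countSpec_succ] at hfuel
              omega
            have hinv' : ∀ q ∈ children ++ rest, (q.length : Int) ≤ m := by
              intro q hq
              rcases List.mem_append.mp hq with hq | hq
              · rcases List.mem_map.mp hq with ⟨l, _, rfl⟩
                simp; omega
              · exact hrest q hq
            rw [if_pos hlt, ih (children ++ rest) _ hinv' hfuel', List.flatMap_append]
            have hchfm : children.flatMap (fun q => emitSpec bl (m - q.length).toNat q)
                = (childLabels bl p).flatMap (fun l => emitSpec bl (m - (p.length + 1)).toNat (p ++ [l])) := by
              rw [hchdef, List.flatMap_map]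
              unfold childLabels
              apply List.flatMap_congr
              intro l hl
              exact congrArg (fun d => emitSpec bl d (p ++ [l])) (hcast l)
            rw [hchfm]
            conv_rhs => rw [List.flatMap_cons, hd, emitSpec_succ]
            simp [List.append_assoc]
          · -- leaf: p.length = m
            have hm : (p.length : Int) = m := by omega
            have hd0 : (m - p.length).toNat = 0 := by omega
            have hfuel' : (rest.map (fun q => countSpec bl (m - q.length).toNat q)).sum ≤ f := by
              simp only [List.map_cons, List.sum_cons] at hfuel
              have := countSpec_pos bl (m - p.length).toNat p
              omega
            rw [if_neg hlt, ih rest _ hrest hfuel']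
            conv_rhs => rw [List.flatMap_cons, hd0, emitSpec_zero]
            simp [List.append_assoc]

-- ===== VERDICT (by name: the statement is the Claim_ definition above) =====
theorem generate_combos_spec : Claim_equal_generate_combos := by
  intro bl m _ hpre
  unfold Spec_generate_combos generate_combos generate_combos_alt
  by_cases hm : 0 ≤ m
  · have hA := gcHelper_emit bl m m.toNat [] [] (by simp; omega) (by simp; omega)
    have hB := altLoop_emit bl m ((bl.length + 1) ^ (m.toNat + 1)) [[]] []
        (by intro p hp; simp at hp; subst hp; simp; omega)
        (by
          simp only [List.map_cons, List.map_nil, List.sum_cons, List.sum_nil,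
            List.length_nil, Nat.cast_zero, Int.sub_zero]
          have := countSpec_le bl m.toNat ([] : List String)
          omega)
    rw [hA, hB]
    simp only [List.flatMap_cons, List.flatMap_nil, List.append_nil, List.nil_append,
      List.length_nil, Nat.cast_zero, Int.sub_zero]
  · -- max_len < 0: both ports return [] right away (Pre_ restricts A's Python to the
    -- all-labels-equal case here, where it indeed returns []; the ports need no case split)
    have hz : m.toNat = 0 := by omega
    rw [hz]
    have hA : gcHelper bl m [] [] 0 = [] := by
      simp [gcHelper]
    have hB : altLoop bl m ((bl.length + 1) ^ (0 + 1)) [[]] [] = [] := by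
      have hpow : (bl.length + 1) ^ (0 + 1) = bl.length + 1 := by ring
      rw [hpow]
      have hlt0 : ¬((0 : Int) < m) := by omega
      simp [altLoop, hlt0]
    rw [hA, hB]

theorem generate_combos_raises : Claim_raises_generate_combos := by
  unfold Claim_raises_generate_combos
  constructor
  · intro bl m _ hr hpre
    rcases hr with ⟨hm, x, hx, y, hy, hxy⟩
    rcases hpre with h | h
    · omega
    · exact hxy (h x hx y hy)
  · exact ⟨by decide, by decide, by decide⟩

-- self-check: the stated raise witness really lies inside Raises_ (extracted from generate_combos_raises)
theorem generate_combos_raises_witness :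
    Raises_generate_combos pvRaiseWitness_generate_combos.1 pvRaiseWitness_generate_combos.2 :=
  generate_combos_raises.2.2.1
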